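-- pv_equiv track=rewrite | github.com/peirong26/Brain-ID | utils/checkpoint.py | _group_keys_by_module
-- ===== SOURCE A (Python) =====
-- from typing import Dict, List
--
-- def _group_keys_by_module(keys: List[str], original_names: Dict[str, str]):
--     """
--     Params in the same submodule are grouped together.
--
--     Args:
--         keys: names of all parameters
--         original_names: mapping from parameter name to their name in the checkpoint
--
--     Returns:
--         dict[name -> all other names in the same group]
--     """
--
--     def _submodule_name(key):
--         pos = key.rfind(".")
--         if pos < 0:
--             return None
--         prefix = key[: pos + 1]
--         return prefix
--
--     all_submodules = [_submodule_name(k) for k in keys]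
--     all_submodules = [x for x in all_submodules if x]
--     all_submodules = sorted(all_submodules, key=len)
--
--     ret = {}
--     for prefix in all_submodules:
--         group = [k for k in keys if k.startswith(prefix)]
--         if len(group) <= 1:
--             continue
--         original_name_lcp = _longest_common_prefix_str([original_names[k] for k in group])
--         if len(original_name_lcp) == 0:
--             # don't group weights if original names don't share prefix
--             continue
--
--         for k in group:
--             if k in ret:
--                 continue
--             ret[k] = group
--     return ret
--
-- def _longest_common_prefix_str(names):
--     m1, m2 = min(names), max(names)
--     lcp = []
--     for a, b in zip(m1, m2):
--         if a == b:
--             lcp.append(a)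
--         else:
--             break
--     lcp = "".join(lcp)
--     return lcp
-- ===== SOURCE B (Python) =====
-- from typing import Dict, List
--
--
-- def _group_keys_by_module(keys: List[str], original_names: Dict[str, str]):
--     """Same result as the original, but groups are built with a prefix index:
--     one pass over the keys fills every submodule group at once (each key walks
--     its own dot positions), instead of re-scanning the whole key list for
--     every submodule prefix."""
--     prefixes = []
--     for k in keys:
--         pos = k.rfind(".")
--         if pos >= 0:
--             prefixes.append(k[: pos + 1])
--
--     groups = {p: [] for p in prefixes}
--     for k in keys:
--         for i, c in enumerate(k):
--             if c == "." and k[: i + 1] in groups: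
--                 groups[k[: i + 1]].append(k)
--
--     ret = {}
--     for p in sorted(prefixes, key=len):
--         g = groups[p]
--         if len(g) <= 1:
--             continue
--         if _longest_common_prefix_str([original_names[k] for k in g]):
--             for k in g:
--                 ret.setdefault(k, g)
--     return ret
--
--
-- def _longest_common_prefix_str(names):
--     m1, m2 = min(names), max(names)
--     lcp = []
--     for a, b in zip(m1, m2):
--         if a == b:
--             lcp.append(a)
--         else:
--             break
--     lcp = "".join(lcp)
--     return lcp
-- ===== Notes on version B (the rewrite author's own statement) =====
-- stated objective: alternative
-- what changed: B builds all submodule groups in one pass with a prefix index (each key walks its own dot positions into a dict keyed by prefix), replacing A's rescan of the whole key list for every prefix; it trades A's per-prefix scans for one indexing pass plus dict lookups.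
import Mathlib
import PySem

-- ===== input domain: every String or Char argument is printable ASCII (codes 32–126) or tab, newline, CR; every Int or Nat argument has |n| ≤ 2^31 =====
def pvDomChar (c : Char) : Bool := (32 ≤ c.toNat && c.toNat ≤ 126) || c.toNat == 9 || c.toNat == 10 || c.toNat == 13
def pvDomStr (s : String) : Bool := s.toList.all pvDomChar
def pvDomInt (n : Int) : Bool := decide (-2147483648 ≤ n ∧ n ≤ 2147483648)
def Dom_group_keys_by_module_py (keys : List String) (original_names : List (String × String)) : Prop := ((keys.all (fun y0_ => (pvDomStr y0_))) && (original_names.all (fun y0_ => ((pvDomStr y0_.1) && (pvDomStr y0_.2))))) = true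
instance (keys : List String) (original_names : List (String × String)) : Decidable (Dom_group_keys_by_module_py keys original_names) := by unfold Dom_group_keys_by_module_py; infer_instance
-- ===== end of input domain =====

-- B replaces A's per-prefix rescan of all keys by a prefix index filled in one pass
-- (each key walks its own dot positions into a dict of groups).

-- ===== PORT A =====

-- helper _longest_common_prefix_str, shared verbatim by both Python files
def pvLcpZip : List Char → List Char → List Char
  | a :: as, b :: bs => if a = b then a :: pvLcpZip as bs else []
  | _, _ => []

def pvLcp (names : List String) : String :=
  match PySem.List.min? names (fun x => x), PySem.List.max? names (fun x => x) with
  | some m1, some m2 => String.ofList (pvLcpZip m1.toList m2.toList)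
  | _, _ => ""   -- min/max of [] raise in Python; never reached (callers pass groups of length ≥ 2)

def pvSubmoduleName (key : String) : Option String :=
  let pos := PySem.Str.rfind key "."
  if pos < 0 then none
  else some (PySem.Str.slice key none (some (pos + 1)))

def group_keys_by_module_py (keys : List String) (original_names : List (String × String)) : List (String × List String) :=
  let all0 := keys.map pvSubmoduleName
  let all1 := all0.filterMap (fun x => match x with
    | some s => if s = "" then none else some s   -- 'if x' truthiness on Optional[str]
    | none => none)
  let subs := PySem.List.sorted all1 (fun s => PySem.Str.len s) false
  let onames : PySem.Dict String String := PySem.Dict.mk original_names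
  (subs.foldl (fun (ret : PySem.Dict String (List String)) pre =>
    let group := keys.filter (fun k => PySem.Str.startswith k pre)
    if group.length ≤ 1 then ret
    else
      let lcp := pvLcp (group.map (fun k => ((onames.get? k).getD "")))  -- get? is some under Pre_ (KeyError outside)
      if PySem.Str.len lcp = 0 then ret
      else group.foldl (fun r k => if r.contains k then r else r.insert k group) ret)
    PySem.Dict.empty).items

-- ===== PORT B =====

-- inner 'for i, c in enumerate(k)' loop of Source B (append under the 'in groups' guard)
def pvIndexKey (k : String) (g : PySem.Dict String (List String)) : PySem.Dict String (List String) :=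
  (PySem.List.enumerate k.toList 0).foldl (fun g ic =>
    if ic.2 = '.' ∧ g.contains (PySem.Str.slice k none (some (ic.1 + 1))) = true
    then g.modify (PySem.Str.slice k none (some (ic.1 + 1))) [] (fun v => v ++ [k])
    else g) g

def group_keys_by_module_py_alt (keys : List String) (original_names : List (String × String)) : List (String × List String) :=
  let prefixes := keys.foldl (fun acc k =>
      let pos := PySem.Str.rfind k "."
      if 0 ≤ pos then acc ++ [PySem.Str.slice k none (some (pos + 1))] else acc) []
  let groups0 := prefixes.foldl (fun (g : PySem.Dict String (List String)) p => g.insert p []) PySem.Dict.empty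
  let groups := keys.foldl (fun g k => pvIndexKey k g) groups0
  let onames : PySem.Dict String String := PySem.Dict.mk original_names
  ((PySem.List.sorted prefixes (fun s => PySem.Str.len s) false).foldl
    (fun (ret : PySem.Dict String (List String)) p =>
      let g := groups.getD p []     -- groups[p]; p is always a key of groups
      if g.length ≤ 1 then ret
      else if PySem.Str.len (pvLcp (g.map (fun k => ((onames.get? k).getD "")))) = 0 then ret
      else g.foldl (fun r k => r.setdefault k g) ret)
    PySem.Dict.empty).items

-- ===== PRECONDITION & SPEC =====

-- Pre_ excludes exactly the inputs on which A raises KeyError: some key of a grouped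
-- submodule (a maximal-dot prefix shared by ≥ 2 keys) has no entry in original_names.
def Pre_group_keys_by_module_py (keys : List String) (original_names : List (String × String)) : Prop :=
  ∀ k ∈ keys, ∀ n ∈ List.range k.toList.length,
    k.toList[n]? = some '.' →
    (∀ m ∈ List.range k.toList.length, n < m → k.toList[m]? ≠ some '.') →
    2 ≤ (keys.filter (fun k' => (k.toList.take (n + 1)).isPrefixOf k'.toList)).length →
    ∀ k' ∈ keys, (k.toList.take (n + 1)).isPrefixOf k'.toList → k' ∈ original_names.map Prod.fst

instance (keys : List String) (original_names : List (String × String)) : Decidable (Pre_group_keys_by_module_py keys original_names) := by unfold Pre_group_keys_by_module_py; infer_instance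

def pvWitness_group_keys_by_module_py : List String × (List (String × String)) :=
  (["a.x", "a.y", "b"], [("a.x", "m.p"), ("a.y", "m.q"), ("b", "z")])

def Spec_group_keys_by_module_py (keys : List String) (original_names : List (String × String)) (out : List (String × List String)) : Prop := out = group_keys_by_module_py_alt keys original_names
instance (keys : List String) (original_names : List (String × String)) (out : List (String × List String)) : Decidable (Spec_group_keys_by_module_py keys original_names out) := by unfold Spec_group_keys_by_module_py; infer_instance

-- ===== CLAIM (what is proved, stated in full; the proofs are below) =====
def Claim_equal_group_keys_by_module_py : Prop := ∀ (keys : List String) (original_names : List (String × String)), Dom_group_keys_by_module_py keys original_names → Pre_group_keys_by_module_py keys original_names → Spec_group_keys_by_module_py keys original_names (group_keys_by_module_py keys original_names)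

-- ===== LEMMAS AND PROOFS =====

theorem pvRfindGo_spec (s : List Char) (j : Nat)
    (h : 0 ≤ PySem.Chars.rfind.go s ['.'] j) :
    ∃ n : Nat, PySem.Chars.rfind.go s ['.'] j = n ∧ ['.'].isPrefixOf (s.drop n) = true := by
  induction j with
  | zero =>
    rw [PySem.Chars.rfind.go] at *
    by_cases hp : (['.'] : List Char).isPrefixOf s = true
    · exact ⟨0, by simp [hp]⟩
    · simp [hp] at h
  | succ j ih =>
    rw [PySem.Chars.rfind.go] at *
    by_cases hp : (['.'] : List Char).isPrefixOf (s.drop (j+1)) = true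
    · exact ⟨j+1, by simp [hp]⟩
    · simp only [hp] at h ⊢
      simp only [Bool.false_eq_true, if_false] at h ⊢
      exact ih h

theorem pvRfind_dot (s : List Char) (h : 0 ≤ PySem.Chars.rfind s ['.']) :
    ∃ n : Nat, PySem.Chars.rfind s ['.'] = n ∧ n < s.length ∧ s[n]? = some '.' := by
  rw [PySem.Chars.rfind] at *
  obtain ⟨n, hn, hp⟩ := pvRfindGo_spec s s.length h
  refine ⟨n, hn, ?_⟩
  rw [List.isPrefixOf_iff_prefix] at hp
  obtain ⟨t, ht⟩ := hp
  have h0 : (s.drop n)[0]? = some '.' := by rw [← ht]; rfl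
  rw [List.getElem?_drop] at h0
  have : n < s.length := by
    by_contra hge
    simp [List.getElem?_eq_none (show s.length ≤ n by omega)] at h0
  exact ⟨this, by simpa using h0⟩

theorem pvSliceDot (k : String) (n : Nat) (hn : n < k.toList.length) :
    (PySem.Str.slice k none (some ((n : Int) + 1))).toList = k.toList.take (n+1) := by
  rw [PySem.Str.toList_slice, PySem.Chars.slice_eq_listSlice]
  simp only [PySem.List.slice, PySem.List.clampIdx]
  simp only [List.drop_zero]
  congr 1
  split_ifs with h1 h2 <;> omega

theorem pvContrib_eq (k : String) :
    (match pvSubmoduleName k with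
      | some s => if s = "" then ([] : List String) else [s]
      | none => []) =
    (if 0 ≤ PySem.Str.rfind k "." then [PySem.Str.slice k none (some (PySem.Str.rfind k "." + 1))] else []) := by
  unfold pvSubmoduleName
  have hr : PySem.Str.rfind k "." = PySem.Chars.rfind k.toList ['.'] := by
    rw [PySem.Str.rfind_eq]
    exact congrArg (PySem.Chars.rfind k.toList) (by decide)
  rw [hr]
  by_cases h : PySem.Chars.rfind k.toList ['.'] < 0
  · rw [if_pos h, if_neg (by omega)]
  · have h0 : 0 ≤ PySem.Chars.rfind k.toList ['.'] := by omega
    rw [if_neg h, if_pos h0]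
    obtain ⟨n, hn, hlt, hd⟩ := pvRfind_dot k.toList h0
    have hne : ¬ (PySem.Str.slice k none (some (PySem.Chars.rfind k.toList ['.'] + 1)) = "") := by
      intro he
      have h2 : (PySem.Str.slice k none (some (PySem.Chars.rfind k.toList ['.'] + 1))).toList = [] := by
        rw [he]; rfl
      rw [hn, pvSliceDot k n hlt] at h2
      have h3 : (k.toList.take (n+1)).length = 0 := by rw [h2]; rfl
      rw [List.length_take] at h3
      omega
    show (if (PySem.Str.slice k none (some (PySem.Chars.rfind k.toList ['.'] + 1))) = "" then ([] : List String) else [PySem.Str.slice k none (some (PySem.Chars.rfind k.toList ['.'] + 1))]) = _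
    rw [if_neg hne]

theorem pvPrefixes_aux (keys : List String) (acc : List String) :
    (keys.foldl (fun acc k =>
      let pos := PySem.Str.rfind k "."
      if 0 ≤ pos then acc ++ [PySem.Str.slice k none (some (pos + 1))] else acc) acc) =
    acc ++ ((keys.map pvSubmoduleName).filterMap (fun x => match x with
      | some s => if s = "" then none else some s
      | none => none)) := by
  induction keys generalizing acc with
  | nil => simp
  | cons k ks ih =>
    simp only [List.foldl_cons, List.map_cons, List.filterMap_cons]
    rw [ih]
    have hstep : (if 0 ≤ PySem.Str.rfind k "." then acc ++ [PySem.Str.slice k none (some (PySem.Str.rfind k "." + 1))] else acc)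
        = acc ++ (match pvSubmoduleName k with
          | some s => if s = "" then ([] : List String) else [s]
          | none => []) := by
      rw [pvContrib_eq k]; split_ifs <;> simp
    show (if 0 ≤ PySem.Str.rfind k "." then acc ++ [PySem.Str.slice k none (some (PySem.Str.rfind k "." + 1))] else acc) ++ _ = _
    rw [hstep, List.append_assoc]
    congr 1
    rcases hs : pvSubmoduleName k with _ | s
    · simp
    · by_cases he : s = "" <;> simp [he]

theorem pvPrefixes_eq (keys : List String) :
    ((keys.map pvSubmoduleName).filterMap (fun x => match x with
      | some s => if s = "" then none else some s
      | none => none)) =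
    (keys.foldl (fun acc k =>
      let pos := PySem.Str.rfind k "."
      if 0 ≤ pos then acc ++ [PySem.Str.slice k none (some (pos + 1))] else acc) []) := by
  rw [pvPrefixes_aux keys []]
  rfl

theorem pvPrefix_shape (keys : List String) (p : String)
    (hp : p ∈ keys.foldl (fun acc k =>
      let pos := PySem.Str.rfind k "."
      if 0 ≤ pos then acc ++ [PySem.Str.slice k none (some (pos + 1))] else acc) []) :
    ∃ q, p.toList = q ++ ['.'] := by
  rw [← pvPrefixes_eq] at hp
  rw [List.mem_filterMap] at hp
  obtain ⟨x, hx, hgx⟩ := hp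
  rcases x with _ | s
  · simp at hgx
  · rw [List.mem_map] at hx
    obtain ⟨k, _, hk⟩ := hx
    by_cases he : s = ""
    · simp [he] at hgx
    · simp only [if_neg he] at hgx
      have hps : p = s := by injection hgx with h; exact h.symm
      subst hps
      unfold pvSubmoduleName at hk
      have hcast : PySem.Str.rfind k "." = PySem.Chars.rfind k.toList ['.'] := by
        rw [PySem.Str.rfind_eq]
        exact congrArg (PySem.Chars.rfind k.toList) (by decide)
      simp only [hcast] at hk
      by_cases hneg : PySem.Chars.rfind k.toList ['.'] < 0
      · rw [if_pos hneg] at hk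
        exact absurd hk (by simp)
      · rw [if_neg hneg] at hk
        obtain ⟨n, hn, hlt, hdot⟩ := pvRfind_dot k.toList (by omega)
        rw [hn] at hk
        injection hk with hk
        refine ⟨k.toList.take n, ?_⟩
        rw [← hk, pvSliceDot k n hlt, List.take_add_one, hdot]
        rfl

theorem pvDot_prefix_iff (p : String) (cs : List Char) (hshape : ∃ q, p.toList = q ++ ['.']) :
    p.toList.isPrefixOf cs = true ↔
      ∃ n ∈ List.range cs.length, cs[n]? = some '.' ∧ p.toList = cs.take (n + 1) := by
  obtain ⟨q, hq⟩ := hshape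
  constructor
  · intro h
    rw [List.isPrefixOf_iff_prefix] at h
    have hlen : p.toList.length ≤ cs.length := h.length_le
    have htake : p.toList = cs.take p.toList.length := (List.prefix_iff_eq_take.mp h)
    refine ⟨q.length, ?_, ?_, ?_⟩
    · rw [List.mem_range]
      have : p.toList.length = q.length + 1 := by rw [hq]; simp
      omega
    · have h1 : p.toList[q.length]? = some '.' := by
        rw [hq]
        simp
      rw [htake] at h1
      rw [List.getElem?_take] at h1
      exact (by simpa using h1 : _ ∧ _).2
    · have : p.toList.length = q.length + 1 := by rw [hq]; simp
      rw [htake, this]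
  · rintro ⟨n, hn, hdot, htake⟩
    rw [List.isPrefixOf_iff_prefix, htake]
    exact List.take_prefix _ _

theorem pvIndexKeyAux (k : String) (rest : List Char) :
    ∀ (s : Nat) (d : PySem.Dict String (List String)), rest = k.toList.drop s →
    ∀ q : String,
    ((PySem.List.enumerate rest (s : Int)).foldl (fun g ic =>
      if ic.2 = '.' ∧ g.contains (PySem.Str.slice k none (some (ic.1 + 1))) = true
      then g.modify (PySem.Str.slice k none (some (ic.1 + 1))) [] (fun v => v ++ [k])
      else g) d).getD q [] =
      if (∃ n ∈ List.range k.toList.length, s ≤ n ∧ k.toList[n]? = some '.' ∧ q.toList = k.toList.take (n + 1))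
          ∧ d.contains q = true
      then d.getD q [] ++ [k] else d.getD q [] := by
  induction rest with
  | nil =>
    intro s d hrest q
    rw [PySem.List.enumerate_nil, List.foldl_nil]
    rw [if_neg]
    rintro ⟨⟨n, hn, hsn, -, -⟩, -⟩
    rw [List.mem_range] at hn
    have hle : k.toList.length ≤ s := by
      by_contra hh
      have := List.drop_eq_nil_iff.mp hrest.symm
      omega
    omega
  | cons c rest' ih =>
    intro s d hrest q
    have hs : s < k.toList.length := by
      by_contra hh
      rw [List.drop_eq_nil_iff.mpr (by omega)] at hrest
      simp at hrest
    have hc : k.toList[s]? = some c := by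
      have h0 : (k.toList.drop s)[0]? = some c := by rw [← hrest]; rfl
      rw [List.getElem?_drop] at h0; simpa using h0
    have hrest' : rest' = k.toList.drop (s+1) := by
      have h1 : List.drop 1 (List.drop s k.toList) = List.drop (s+1) k.toList := by
        rw [← List.drop_drop]
      rw [← h1, ← hrest]; rfl
    have hcast : ((s+1 : Nat) : Int) = (s : Int) + 1 := by push_cast; ring
    have hpre : (PySem.Str.slice k none (some ((s:Int) + 1))).toList = k.toList.take (s+1) :=
      pvSliceDot k s hs
    rw [PySem.List.enumerate_cons, List.foldl_cons]
    dsimp only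
    by_cases hguard : c = '.' ∧ d.contains (PySem.Str.slice k none (some ((s:Int) + 1))) = true
    · rw [if_pos hguard]
      have ih' := ih (s+1) (d.modify (PySem.Str.slice k none (some ((s:Int) + 1))) [] (fun v => v ++ [k])) hrest' q
      rw [hcast] at ih'
      rw [ih']
      by_cases hqp : q = PySem.Str.slice k none (some ((s:Int) + 1))
      · have hcond2 : ¬ ((∃ n ∈ List.range k.toList.length, s + 1 ≤ n ∧ k.toList[n]? = some '.' ∧ q.toList = k.toList.take (n + 1))
            ∧ (d.modify (PySem.Str.slice k none (some ((s:Int) + 1))) [] (fun v => v ++ [k])).contains q = true) := by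
          rintro ⟨⟨n, hn, hsn, -, htk⟩, -⟩
          rw [List.mem_range] at hn
          rw [hqp, hpre] at htk
          have hll : (k.toList.take (s+1)).length = (k.toList.take (n+1)).length := by rw [htk]
          rw [List.length_take, List.length_take] at hll
          omega
        rw [if_neg hcond2]
        rw [PySem.Dict.getD_modify, if_pos hqp]
        rw [if_pos]
        · rw [hqp]
        refine ⟨⟨s, ?_, le_refl s, by rw [hc, hguard.1], by rw [hqp, hpre]⟩, by rw [hqp]; exact hguard.2⟩
        rw [List.mem_range]; exact hs
      · have hqpb : (q == PySem.Str.slice k none (some ((s:Int) + 1))) = false := by simpa using hqp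
        have hcont : (d.modify (PySem.Str.slice k none (some ((s:Int) + 1))) [] (fun v => v ++ [k])).contains q = d.contains q := by
          rw [PySem.Dict.contains_modify, hqpb, Bool.false_or]
        have hgetD : (d.modify (PySem.Str.slice k none (some ((s:Int) + 1))) [] (fun v => v ++ [k])).getD q [] = d.getD q [] := by
          rw [PySem.Dict.getD_modify, if_neg hqp]
        rw [hcont, hgetD]
        have hiff : ((∃ n ∈ List.range k.toList.length, s + 1 ≤ n ∧ k.toList[n]? = some '.' ∧ q.toList = k.toList.take (n + 1)) ∧ d.contains q = true)
            ↔ ((∃ n ∈ List.range k.toList.length, s ≤ n ∧ k.toList[n]? = some '.' ∧ q.toList = k.toList.take (n + 1)) ∧ d.contains q = true) := by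
          constructor
          · rintro ⟨⟨n, hn, hsn, hd2, htk⟩, hct⟩
            exact ⟨⟨n, hn, by omega, hd2, htk⟩, hct⟩
          · rintro ⟨⟨n, hn, hsn, hd2, htk⟩, hct⟩
            refine ⟨⟨n, hn, ?_, hd2, htk⟩, hct⟩
            rcases Nat.lt_or_ge s n with h | h
            · omega
            · exfalso
              have hns : n = s := by omega
              subst hns
              exact hqp (String.toList_inj.mp (by rw [htk, hpre]))
        rw [if_congr hiff rfl rfl]
    · rw [if_neg hguard]
      have ih' := ih (s+1) d hrest' q
      rw [hcast] at ih'
      rw [ih']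
      have hiff : ((∃ n ∈ List.range k.toList.length, s + 1 ≤ n ∧ k.toList[n]? = some '.' ∧ q.toList = k.toList.take (n + 1)) ∧ d.contains q = true)
          ↔ ((∃ n ∈ List.range k.toList.length, s ≤ n ∧ k.toList[n]? = some '.' ∧ q.toList = k.toList.take (n + 1)) ∧ d.contains q = true) := by
        constructor
        · rintro ⟨⟨n, hn, hsn, hd2, htk⟩, hct⟩
          exact ⟨⟨n, hn, by omega, hd2, htk⟩, hct⟩
        · rintro ⟨⟨n, hn, hsn, hd2, htk⟩, hct⟩
          refine ⟨⟨n, hn, ?_, hd2, htk⟩, hct⟩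
          rcases Nat.lt_or_ge s n with h | h
          · omega
          · exfalso
            have hns : n = s := by omega
            rw [hns] at hd2 htk
            have hcdot : c = '.' := by
              rw [hc] at hd2
              exact Option.some_inj.mp hd2
            have hqpre : q = PySem.Str.slice k none (some ((s:Int) + 1)) :=
              String.toList_inj.mp (by rw [htk, hpre])
            exact hguard ⟨hcdot, by rw [← hqpre]; exact hct⟩
      rw [if_congr hiff rfl rfl]

theorem pvIndexKey_getD (k : String) (d : PySem.Dict String (List String)) (q : String) :
    (pvIndexKey k d).getD q [] =
      if (∃ n ∈ List.range k.toList.length, k.toList[n]? = some '.' ∧ q.toList = k.toList.take (n + 1))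
          ∧ d.contains q = true
      then d.getD q [] ++ [k] else d.getD q [] := by
  unfold pvIndexKey
  have h := pvIndexKeyAux k k.toList 0 d (by rfl) q
  rw [show ((0:Nat) : Int) = (0 : Int) by rfl] at h
  rw [h]
  have hiff : ((∃ n ∈ List.range k.toList.length, 0 ≤ n ∧ k.toList[n]? = some '.' ∧ q.toList = k.toList.take (n + 1)) ∧ d.contains q = true)
      ↔ ((∃ n ∈ List.range k.toList.length, k.toList[n]? = some '.' ∧ q.toList = k.toList.take (n + 1)) ∧ d.contains q = true) := by
    constructor
    · rintro ⟨⟨n, hn, -, hd2, htk⟩, hct⟩; exact ⟨⟨n, hn, hd2, htk⟩, hct⟩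
    · rintro ⟨⟨n, hn, hd2, htk⟩, hct⟩; exact ⟨⟨n, hn, Nat.zero_le n, hd2, htk⟩, hct⟩
  rw [if_congr hiff rfl rfl]

theorem pvFoldContains (k : String) (l : List (Int × Char)) :
    ∀ (d : PySem.Dict String (List String)) (q : String),
    (l.foldl (fun g ic =>
      if ic.2 = '.' ∧ g.contains (PySem.Str.slice k none (some (ic.1 + 1))) = true
      then g.modify (PySem.Str.slice k none (some (ic.1 + 1))) [] (fun v => v ++ [k])
      else g) d).contains q = d.contains q := by
  induction l with
  | nil => intro d q; rfl
  | cons ic l ih =>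
    intro d q
    rw [List.foldl_cons, ih]
    by_cases hg : ic.2 = '.' ∧ d.contains (PySem.Str.slice k none (some (ic.1 + 1))) = true
    · rw [if_pos hg, PySem.Dict.contains_modify]
      by_cases hq : q = PySem.Str.slice k none (some (ic.1 + 1))
      · rw [hq]
        simp [hg.2]
      · simp [hq]
    · rw [if_neg hg]

theorem pvIndexKey_contains (k : String) (d : PySem.Dict String (List String)) (q : String) :
    (pvIndexKey k d).contains q = d.contains q := by
  unfold pvIndexKey
  exact pvFoldContains k _ d q

theorem pvGroups0_getD (l : List String) :
    ∀ (d : PySem.Dict String (List String)) (q : String), d.getD q [] = [] →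
    (l.foldl (fun g p => g.insert p ([] : List String)) d).getD q [] = [] := by
  induction l with
  | nil => intro d q h; exact h
  | cons p l ih =>
    intro d q h
    rw [List.foldl_cons]
    refine ih _ q ?_
    rw [PySem.Dict.getD_insert]
    split_ifs <;> [rfl; exact h]

theorem pvInsFold_contains_mono (l : List String) :
    ∀ (d : PySem.Dict String (List String)) (q : String), d.contains q = true →
    (l.foldl (fun g p => g.insert p ([] : List String)) d).contains q = true := by
  induction l with
  | nil => intro d q h; exact h
  | cons p l ih =>
    intro d q h
    rw [List.foldl_cons]
    refine ih _ q ?_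
    rw [PySem.Dict.contains_insert]
    simp [h]

theorem pvGroups0_contains (l : List String) :
    ∀ (d : PySem.Dict String (List String)) (q : String), q ∈ l →
    (l.foldl (fun g p => g.insert p ([] : List String)) d).contains q = true := by
  induction l with
  | nil => intro d q h; exact absurd h (List.not_mem_nil)
  | cons p l ih =>
    intro d q h
    rw [List.foldl_cons]
    rcases List.mem_cons.mp h with h | h
    · refine pvInsFold_contains_mono l _ q ?_
      rw [PySem.Dict.contains_insert]
      simp [h]
    · exact ih _ q h

theorem pvGroupsFold_getD (p : String)
    (hshape : ∃ q, p.toList = q ++ ['.']) :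
    ∀ (ks : List String) (d : PySem.Dict String (List String)), d.contains p = true →
    (ks.foldl (fun g k => pvIndexKey k g) d).getD p [] =
      d.getD p [] ++ ks.filter (fun k => PySem.Str.startswith k p) := by
  intro ks
  induction ks with
  | nil => intro d h; simp
  | cons k ks ih =>
    intro d hc
    rw [List.foldl_cons, List.filter_cons]
    rw [ih _ (by rw [pvIndexKey_contains]; exact hc)]
    rw [pvIndexKey_getD]
    have hsw : PySem.Str.startswith k p = p.toList.isPrefixOf k.toList := by
      rw [PySem.Str.startswith_eq]
      rfl
    by_cases hpref : p.toList.isPrefixOf k.toList = true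
    · have hex := (pvDot_prefix_iff p k.toList hshape).mp hpref
      rw [if_pos ⟨hex, hc⟩]
      rw [hsw, hpref]
      simp
    · rw [if_neg]
      · rw [hsw]
        simp only [Bool.not_eq_true] at hpref
        rw [hpref]
        simp
      rintro ⟨hex, -⟩
      exact hpref ((pvDot_prefix_iff p k.toList hshape).mpr hex)

theorem pvGroup_eq (keys : List String) (p : String)
    (hp : p ∈ keys.foldl (fun acc k =>
      let pos := PySem.Str.rfind k "."
      if 0 ≤ pos then acc ++ [PySem.Str.slice k none (some (pos + 1))] else acc) []) :
    (keys.foldl (fun g k => pvIndexKey k g)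
      ((keys.foldl (fun acc k =>
        let pos := PySem.Str.rfind k "."
        if 0 ≤ pos then acc ++ [PySem.Str.slice k none (some (pos + 1))] else acc) []).foldl
          (fun (g : PySem.Dict String (List String)) p => g.insert p []) PySem.Dict.empty)).getD p [] =
    keys.filter (fun k => PySem.Str.startswith k p) := by
  have hshape := pvPrefix_shape keys p hp
  have hc := pvGroups0_contains _ PySem.Dict.empty p hp
  rw [pvGroupsFold_getD p hshape keys _ hc]
  rw [pvGroups0_getD _ PySem.Dict.empty p (PySem.Dict.getD_empty p [])]
  rfl

-- ===== VERDICT (by name: the statement is the Claim_ definition above) =====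
theorem group_keys_by_module_py_spec : Claim_equal_group_keys_by_module_py := by
  intro keys original_names _ _
  unfold Spec_group_keys_by_module_py
  unfold group_keys_by_module_py group_keys_by_module_py_alt
  dsimp only
  rw [pvPrefixes_eq keys]
  apply congrArg PySem.Dict.items
  apply PySem.List.foldl_congr_mem
  intro acc p hp
  have hp' := (PySem.List.mem_sorted _ _ _ p).mp hp
  rw [pvGroup_eq keys p hp']
  by_cases h1 : (keys.filter (fun k => PySem.Str.startswith k p)).length ≤ 1
  · rw [if_pos h1, if_pos h1]
  · rw [if_neg h1, if_neg h1]
    by_cases h2 : PySem.Str.len (pvLcp ((keys.filter (fun k => PySem.Str.startswith k p)).map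
        (fun k => ((PySem.Dict.mk original_names).get? k).getD ""))) = 0
    · rw [if_pos h2, if_pos h2]
    · rw [if_neg h2, if_neg h2]
      apply PySem.List.foldl_congr_mem
      intro r k _
      by_cases hk : r.contains k = true
      · rw [if_pos hk, PySem.Dict.setdefault_of_contains r _ hk]
      · rw [if_neg hk, PySem.Dict.setdefault_of_not_contains r _ (by simpa using hk)]
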